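-- pv_equiv track=rewrite | github.com/alon-cohen-23/wikipedia_util | acronyms/local_acronym_info.py | create_partitions
-- ===== SOURCE A (Python) =====
-- def create_partitions(l, k=2):
--     if len(l) == 0: return [l]
--     if len(l) == 1: return [[l]]
--     full_res = []
--     for i in range(1, min(k, len(l)) + 1):
--         pref = l[:i]
--         partial_partitions = create_partitions(l[i:], k)
--         for pp_index in range(len(partial_partitions)):
--             partial_partitions[pp_index] = [pref, *partial_partitions[pp_index]]
--         full_res += partial_partitions
--     return full_res
-- ===== SOURCE B (Python) =====
-- def create_partitions(l, k=2):
--     # Bottom-up DP over suffix start positions: dp holds the partition lists of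
--     # the suffixes l[i:], l[i+1:], ..., l[n:], each computed exactly once.
--     n = len(l)
--     if n == 0:
--         return [l]
--     # dp[0] <-> suffix of length 1 (base case), dp[1] <-> empty suffix.
--     dp = [[[[l[-1]]]], [[]]]
--     for i in range(n - 2, -1, -1):
--         res = []
--         for j in range(1, min(k, n - i) + 1):
--             res.extend([l[i:i + j]] + p for p in dp[j - 1])
--         dp.insert(0, res)
--     return dp[0]
-- ===== Notes on version B (the rewrite author's own statement) =====
-- stated objective: alternative
-- what changed: Replaces the top-down recursion that recomputes the partition set of every suffix once per path to it with a bottom-up dynamic program that tabulates each suffix's partition list exactly once (dp indexed by suffix start, filled right-to-left).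
import Mathlib
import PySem

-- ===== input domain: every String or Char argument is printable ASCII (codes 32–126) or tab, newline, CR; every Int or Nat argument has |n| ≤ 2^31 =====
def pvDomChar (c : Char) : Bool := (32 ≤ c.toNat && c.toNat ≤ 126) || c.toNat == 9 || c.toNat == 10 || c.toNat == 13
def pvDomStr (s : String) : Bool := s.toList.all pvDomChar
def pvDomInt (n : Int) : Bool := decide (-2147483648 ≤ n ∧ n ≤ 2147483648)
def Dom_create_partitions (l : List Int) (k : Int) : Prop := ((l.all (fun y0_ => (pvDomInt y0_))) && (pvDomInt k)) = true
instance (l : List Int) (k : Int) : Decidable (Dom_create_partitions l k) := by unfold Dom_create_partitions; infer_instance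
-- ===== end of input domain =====

-- B replaces A's top-down recursion by a bottom-up suffix DP (each suffix table computed once); same return value, no speed claim.


-- ===== PORT A =====
def create_partitions (l : List Int) (k : Int) : List (List (List Int)) :=
  if l.length = 0 then [[]]           -- 'return [l]' with l = []
  else if l.length = 1 then [[l]]
  else
    (PySem.List.pyRange 1 (min k (l.length : Int) + 1) 1).attach.foldl
      (fun full_res i =>
        let pref := PySem.List.slice l none (some i.1)
        let partial_partitions :=
          (create_partitions (PySem.List.slice l (some i.1) none) k).map
            (fun pp => pref :: pp)
        full_res ++ partial_partitions)
      []
termination_by l.length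
decreasing_by
  have hm := (PySem.List.mem_pyRange_one.mp i.2).1
  rw [PySem.List.slice_from (xs := l) (a := i.1) (by omega)]
  simp only [List.length_drop]
  omega

-- ===== PORT B =====
def create_partitions_alt (l : List Int) (k : Int) : List (List (List Int)) :=
  let n : Int := (l.length : Int)
  if l.length = 0 then [[]]           -- 'return [l]' with l = []
  else
    let dp0 : List (List (List (List Int))) := [[[[PySem.List.pyGetD l (-1) 0]]], [[]]]
    let dp := (PySem.List.pyRange (n - 2) (-1) (-1)).foldl
      (fun dp i =>
        let res := (PySem.List.pyRange 1 (min k (n - i) + 1) 1).foldl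
          (fun res j =>
            res ++ (PySem.List.pyGetD dp (j - 1) ([] : List (List (List Int)))).map
              (fun p => PySem.List.slice l (some i) (some (i + j)) :: p))
          []
        res :: dp)
      dp0
    PySem.List.pyGetD dp 0 []

-- ===== PRECONDITION & SPEC =====
def Spec_create_partitions (l : List Int) (k : Int) (out : List (List (List Int))) : Prop := out = create_partitions_alt l k
instance (l : List Int) (k : Int) (out : List (List (List Int))) : Decidable (Spec_create_partitions l k out) := by unfold Spec_create_partitions; infer_instance

-- ===== CLAIM (what is proved, stated in full; the proofs are below) =====
def Claim_equal_create_partitions : Prop := ∀ (l : List Int) (k : Int), Dom_create_partitions l k → Spec_create_partitions l k (create_partitions l k)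

-- ===== LEMMAS AND PROOFS =====

-- the table of suffix results B maintains: entries for suffix starts m, m+1, ..., l.length
def dpAt (l : List Int) (k : Int) (m : Nat) : List (List (List (List Int))) :=
  (List.range (l.length + 1 - m)).map (fun t => create_partitions (l.drop (m + t)) k)

-- the loop body of B's outer fold, named so the proofs can speak about it
def bstep (l : List Int) (k : Int) (dp : List (List (List (List Int)))) (i : Int) :
    List (List (List (List Int))) :=
  ((PySem.List.pyRange 1 (min k ((l.length : Int) - i) + 1) 1).foldl
    (fun res j =>
      res ++ (PySem.List.pyGetD dp (j - 1) ([] : List (List (List Int)))).map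
        (fun p => PySem.List.slice l (some i) (some (i + j)) :: p))
    []) :: dp

lemma alt_eq (l : List Int) (k : Int) (h : ¬ l.length = 0) :
    create_partitions_alt l k = PySem.List.pyGetD
      ((PySem.List.pyRange ((l.length : Int) - 2) (-1) (-1)).foldl (bstep l k)
        [[[[PySem.List.pyGetD l (-1) 0]]], [[]]]) 0 [] := by
  unfold create_partitions_alt bstep
  simp only [if_neg h]

lemma create_partitions_eq_loop (l' : List Int) (k : Int) (h2 : 2 ≤ l'.length) :
    create_partitions l' k = (PySem.List.pyRange 1 (min k (l'.length : Int) + 1) 1).foldl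
      (fun full_res i => full_res ++
        (create_partitions (PySem.List.slice l' (some i) none) k).map
          (fun pp => PySem.List.slice l' none (some i) :: pp)) [] := by
  rw [create_partitions]
  rw [if_neg (by omega), if_neg (by omega)]
  exact List.foldl_attach (f := fun full_res i => full_res ++
        (create_partitions (PySem.List.slice l' (some i) none) k).map
          (fun pp => PySem.List.slice l' none (some i) :: pp))

lemma dpAt_cons (l : List Int) (k : Int) (m : Nat) (hm : m ≤ l.length) :
    dpAt l k m = create_partitions (l.drop m) k :: dpAt l k (m + 1) := by
  unfold dpAt
  rw [show l.length + 1 - m = (l.length - m) + 1 by omega, List.range_succ_eq_map]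
  simp only [List.map_cons, List.map_map, Nat.add_zero]
  refine congrArg₂ List.cons rfl ?_
  rw [show l.length + 1 - (m + 1) = l.length - m by omega]
  apply List.map_congr_left
  intro t _
  simp only [Function.comp_apply]
  congr 2
  omega

lemma pyGetD_dpAt (l : List Int) (k : Int) (m j : Nat) (hj : j < l.length + 1 - m) :
    PySem.List.pyGetD (dpAt l k m) ((j : Nat) : Int) [] =
      create_partitions (l.drop (m + j)) k := by
  unfold dpAt
  rw [PySem.List.pyGetD_natCast]
  rw [List.getD_eq_getElem _ _ (by simpa using hj)]
  simp

lemma bstep_head (l : List Int) (k : Int) (i : Nat) (hi : i + 2 ≤ l.length) :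
    bstep l k (dpAt l k (i + 1)) (i : Int) = dpAt l k i := by
  rw [dpAt_cons l k i (by omega)]
  unfold bstep
  refine congrArg₂ List.cons ?_ rfl
  rw [create_partitions_eq_loop (l.drop i) k (by simp; omega)]
  have hlen : ((l.drop i).length : Int) = (l.length : Int) - i := by
    simp; omega
  rw [hlen]
  apply PySem.List.foldl_congr_mem
  intro acc j hjmem
  have hj := PySem.List.mem_pyRange_one.mp hjmem
  have hj1 : 1 ≤ j := hj.1
  have hj2 : j ≤ min k ((l.length : Int) - i) := by omega
  have hjn : j ≤ (l.length : Int) - i := le_trans hj2 (min_le_right _ _)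
  congr 1
  · -- the tail partitions: dp lookup = recursive call
    have e1 : PySem.List.slice (l.drop i) (some j) none = l.drop (i + j.toNat) := by
      rw [PySem.List.slice_from (xs := l.drop i) (a := j) (by omega), List.drop_drop]
    rw [e1]
    have e2 : j - 1 = ((j.toNat - 1 : Nat) : Int) := by omega
    rw [e2, pyGetD_dpAt l k (i + 1) (j.toNat - 1) (by omega)]
    rw [show (i + 1) + (j.toNat - 1) = i + j.toNat by omega]
    -- prefixes match
    have e3 : PySem.List.slice (l.drop i) none (some j) = (l.drop i).take j.toNat :=
      PySem.List.slice_to _ (by omega)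
    have e4 : PySem.List.slice l (some (i : Int)) (some ((i : Int) + j)) =
        (l.drop i).take j.toNat := by
      rw [PySem.List.slice_toNat _ (by omega) (by omega)]
      simp only [Int.toNat_natCast]
      rw [show ((i : Int) + j).toNat - i = j.toNat by omega]
    rw [e3, e4]

lemma fold_dp (l : List Int) (k : Int) (m : Nat) (hm : m + 1 ≤ l.length) :
    (PySem.List.pyRange ((m : Int) - 1) (-1) (-1)).foldl (bstep l k) (dpAt l k m) =
      dpAt l k 0 := by
  induction m with
  | zero =>
    rw [show ((0 : Nat) : Int) - 1 = (-1 : Int) by norm_num,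
      PySem.List.pyRange_neg_one_eq_nil (by omega)]
    rfl
  | succ m ih =>
    rw [show ((m + 1 : Nat) : Int) - 1 = (m : Int) by push_cast; ring]
    rw [PySem.List.pyRange_neg_one_cons (by omega), List.foldl_cons]
    rw [bstep_head l k m (by omega)]
    exact ih (by omega)

lemma dp0_eq (l : List Int) (k : Int) (h : l ≠ []) :
    ([[[[PySem.List.pyGetD l (-1) 0]]], [[]]] : List (List (List (List Int)))) =
      dpAt l k (l.length - 1) := by
  have hlen : 1 ≤ l.length := List.length_pos_iff.mpr h
  unfold dpAt
  rw [show l.length + 1 - (l.length - 1) = 2 by omega]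
  rw [show List.range 2 = [0, 1] from rfl]
  simp only [List.map_cons, List.map_nil, Nat.add_zero]
  rw [show l.length - 1 + 1 = l.length by omega, List.drop_length]
  rw [List.drop_length_sub_one h]
  rw [PySem.List.pyGetD_neg_one l 0 h]
  rw [create_partitions, create_partitions]
  norm_num

-- ===== VERDICT (by name: the statement is the Claim_ definition above) =====
theorem create_partitions_spec : Claim_equal_create_partitions := by
  intro l k _
  unfold Spec_create_partitions
  by_cases h0 : l.length = 0
  · have hl : l = [] := List.eq_nil_of_length_eq_zero h0
    subst hl
    rw [create_partitions, create_partitions_alt]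
    rfl
  · have hne : l ≠ [] := by intro h; subst h; exact h0 rfl
    rw [alt_eq l k h0, dp0_eq l k hne]
    rw [show (l.length : Int) - 2 = ((l.length - 1 : Nat) : Int) - 1 by omega]
    rw [fold_dp l k (l.length - 1) (by omega)]
    rw [dpAt_cons l k 0 (by omega)]
    rw [PySem.List.pyGetD_zero_cons]
    rw [List.drop_zero]
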